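-- pv_equiv track=rewrite | github.com/meiaalsup/lda_infographics | data_clean_functions.py | sort_by_annotations
-- ===== SOURCE A (Python) =====
-- def sort_by_annotations(data):
--     labels = {}
--     for path, ann in data.items():
--         for label, label_data in ann.items():
--             label_type = label_data["type"]
--             if not labels.get(label_type, False):
--                 labels[label_type] = {}
--             # add the annotation to the appropriate bucket
--             labels[label_type][label] = labels[label_type].get(label, [])
--             labels[label_type][label].append(path)
--     return labels;
-- ===== SOURCE B (Python) =====
-- def sort_by_annotations(data):
--     # flatten to (type, label, path) triples, then group by first-occurrence
--     # order of type and label with comprehensions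
--     flat = [(ld["type"], label, path)
--             for path, ann in data.items()
--             for label, ld in ann.items()]
--     return {t: {l: [p for t2, l2, p in flat if t2 == t and l2 == l]
--                 for l in dict.fromkeys(l2 for t2, l2, _ in flat if t2 == t)}
--             for t in dict.fromkeys(t for t, _, _ in flat)}
-- ===== Notes on version B (the rewrite author's own statement) =====
-- stated objective: alternative
-- what changed: B flattens the nested dicts into one list of (type, label, path) triples and then builds the result with grouping comprehensions (dict.fromkeys for first-occurrence key order, filters for the path lists) instead of A's incremental in-place mutation of nested bucket dicts.
import Mathlib
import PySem

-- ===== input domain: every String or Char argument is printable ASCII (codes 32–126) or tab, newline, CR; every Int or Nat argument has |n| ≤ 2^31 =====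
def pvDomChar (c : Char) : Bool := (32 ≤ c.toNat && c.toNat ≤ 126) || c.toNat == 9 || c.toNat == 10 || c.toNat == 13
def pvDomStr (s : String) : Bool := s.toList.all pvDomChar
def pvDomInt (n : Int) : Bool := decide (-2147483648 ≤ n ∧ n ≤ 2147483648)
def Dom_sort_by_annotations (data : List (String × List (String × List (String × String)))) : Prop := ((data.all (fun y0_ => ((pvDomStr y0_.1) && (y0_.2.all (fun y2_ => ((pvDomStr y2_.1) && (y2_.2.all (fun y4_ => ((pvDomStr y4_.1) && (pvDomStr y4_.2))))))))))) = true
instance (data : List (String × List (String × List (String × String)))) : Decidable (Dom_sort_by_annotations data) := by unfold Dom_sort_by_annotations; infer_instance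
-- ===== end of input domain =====

-- ===== PORT A =====
-- B replaces A's incremental nested-dict building with a flatten-then-group decomposition
-- (one flattening pass, then grouping comprehensions); same return value, objective: alternative.
-- Transliteration of A. label_data["type"] (a raising lookup) is ported as a first-match lookup
-- with default "" — Pre_ below admits exactly the inputs where every label_data has the key "type",
-- i.e. where the Python A returns instead of raising KeyError.
def sort_by_annotations (data : List (String × List (String × List (String × String)))) : List (String × List (String × List String)) :=
  (data.foldl (fun labels pa =>
      pa.2.foldl (fun labels lld =>
        let label_type := (PySem.Dict.mk lld.2).getD "type" ""
        let labels :=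
          match labels.get? label_type with
          | none => labels.insert label_type PySem.Dict.empty
          | some d => if d.items.isEmpty then labels.insert label_type PySem.Dict.empty else labels
        let bucket := labels.getD label_type PySem.Dict.empty
        labels.insert label_type (bucket.insert lld.1 (bucket.getD lld.1 [] ++ [pa.1])))
      labels)
    (PySem.Dict.empty : PySem.Dict String (PySem.Dict String (List String)))).items.map
    (fun p => (p.1, p.2.items))

-- ===== PORT B =====
-- Transliteration of Source B: flatten to (type, label, path) triples, then group by
-- first-occurrence order (dict.fromkeys = PySem.List.dedup) with filtering comprehensions.
def sort_by_annotations_alt (data : List (String × List (String × List (String × String)))) : List (String × List (String × List String)) :=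
  let flat : List (String × String × String) :=
    data.flatMap (fun pa => pa.2.map (fun lld => ((PySem.Dict.mk lld.2).getD "type" "", lld.1, pa.1)))
  (PySem.List.dedup (flat.map (fun x => x.1))).map (fun t =>
    (t, (PySem.List.dedup ((flat.filter (fun x => x.1 == t)).map (fun x => x.2.1))).map (fun l =>
      (l, (flat.filter (fun x => x.1 == t && x.2.1 == l)).map (fun x => x.2.2)))))

-- ===== PRECONDITION & SPEC =====
-- Pre_ excludes exactly the inputs where some label_data lacks the key "type": there the
-- Python A raises KeyError (returns nothing).
def Pre_sort_by_annotations (data : List (String × List (String × List (String × String)))) : Prop :=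
  ∀ pa ∈ data, ∀ lld ∈ pa.2, "type" ∈ lld.2.map Prod.fst
instance (data : List (String × List (String × List (String × String)))) : Decidable (Pre_sort_by_annotations data) := by unfold Pre_sort_by_annotations; infer_instance
def pvWitness_sort_by_annotations : (List (String × List (String × List (String × String)))) :=
  [("img1.jpg", [("cat", [("type", "animal")]), ("car", [("type", "vehicle")])]),
   ("img2.jpg", [("dog", [("type", "animal")])])]
def Spec_sort_by_annotations (data : List (String × List (String × List (String × String)))) (out : List (String × List (String × List String))) : Prop := out = sort_by_annotations_alt data
instance (data : List (String × List (String × List (String × String)))) (out : List (String × List (String × List String))) : Decidable (Spec_sort_by_annotations data out) := by unfold Spec_sort_by_annotations; infer_instance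

-- ===== CLAIM (what is proved, stated in full; the proofs are below) =====
def Claim_equal_sort_by_annotations : Prop := ∀ (data : List (String × List (String × List (String × String)))), Dom_sort_by_annotations data → Pre_sort_by_annotations data → Spec_sort_by_annotations data (sort_by_annotations data)

-- ===== LEMMAS AND PROOFS =====

-- the flattened triple list (proof-side name for the list B builds)
def pvFlat (data : List (String × List (String × List (String × String)))) : List (String × String × String) :=
  data.flatMap (fun pa => pa.2.map (fun lld => ((PySem.Dict.mk lld.2).getD "type" "", lld.1, pa.1)))

-- A's loop body, acting on one flattened triple
def pvStep (labels : PySem.Dict String (PySem.Dict String (List String))) (x : String × String × String) :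
    PySem.Dict String (PySem.Dict String (List String)) :=
  let labels :=
    match labels.get? x.1 with
    | none => labels.insert x.1 PySem.Dict.empty
    | some d => if d.items.isEmpty then labels.insert x.1 PySem.Dict.empty else labels
  let bucket := labels.getD x.1 PySem.Dict.empty
  labels.insert x.1 (bucket.insert x.2.1 (bucket.getD x.2.1 [] ++ [x.2.2]))

-- the inner (label -> paths) dict built from a list of (label, path) pairs
def pvInner (ps : List (String × String)) : PySem.Dict String (List String) :=
  ps.foldl (fun d q => d.insert q.1 (d.getD q.1 [] ++ [q.2])) PySem.Dict.empty

-- the (label, path) pairs of type t among the triples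
def pvSel (ts : List (String × String × String)) (t : String) : List (String × String) :=
  (ts.filter (fun y => y.1 == t)).map (fun y => y.2)

lemma pvFoldl_nested (data : List (String × List (String × List (String × String))))
    (acc : PySem.Dict String (PySem.Dict String (List String))) :
    data.foldl (fun labels pa =>
      pa.2.foldl (fun labels lld =>
        let label_type := (PySem.Dict.mk lld.2).getD "type" ""
        let labels :=
          match labels.get? label_type with
          | none => labels.insert label_type PySem.Dict.empty
          | some d => if d.items.isEmpty then labels.insert label_type PySem.Dict.empty else labels
        let bucket := labels.getD label_type PySem.Dict.empty
        labels.insert label_type (bucket.insert lld.1 (bucket.getD lld.1 [] ++ [pa.1])))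
      labels) acc
    = (pvFlat data).foldl pvStep acc := by
  induction data generalizing acc with
  | nil => rfl
  | cons pa rest ih =>
      rw [List.foldl_cons, ih]
      show _ = ((pa.2.map fun lld => ((PySem.Dict.mk lld.2).getD "type" "", lld.1, pa.1)) ++ pvFlat rest).foldl pvStep acc
      rw [List.foldl_append, List.foldl_map]
      rfl

lemma pvDedup_append (xs : List String) (x : String) :
    PySem.List.dedup (xs ++ [x]) = if x ∈ xs then PySem.List.dedup xs else PySem.List.dedup xs ++ [x] := by
  have hmem : x ∈ PySem.List.dedup xs ↔ x ∈ xs := PySem.List.mem_dedup ..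
  simp only [PySem.List.dedup, PySem.Set.ofList, List.foldl_append, List.foldl_cons,
    List.foldl_nil, PySem.Set.empty] at *
  rw [PySem.Set.add, PySem.Set.contains]
  by_cases h : x ∈ xs
  · simp [h, hmem.2 h]
  · have hn : x ∉ List.foldl PySem.Set.add [] xs := fun hc => h (hmem.1 hc)
    simp [h, hn]

lemma pvDedup_ne_nil (xs : List String) (h : xs ≠ []) : PySem.List.dedup xs ≠ [] := by
  obtain ⟨y, ys, rfl⟩ := List.exists_cons_of_ne_nil h
  intro hnil
  have hy : y ∈ PySem.List.dedup (y :: ys) := (PySem.List.mem_dedup ..).2 (by simp)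
  rw [hnil] at hy
  exact (List.not_mem_nil) hy

lemma pvInner_append (ps : List (String × String)) (q : String × String) :
    pvInner (ps ++ [q]) = (pvInner ps).insert q.1 ((pvInner ps).getD q.1 [] ++ [q.2]) := by
  simp [pvInner, List.foldl_append]

lemma pvInner_items (ps : List (String × String)) :
    (pvInner ps).items
      = (PySem.List.dedup (ps.map (fun q => q.1))).map
          (fun l => (l, (ps.filter (fun q => q.1 == l)).map (fun q => q.2))) := by
  induction ps using List.reverseRecOn with
  | nil => rfl
  | append_singleton ps q ih =>
    rw [pvInner_append]
    have hkeys : (pvInner ps).keys = PySem.List.dedup (ps.map (fun r => r.1)) := by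
      simp only [PySem.Dict.keys, ih, List.map_map]
      simp [Function.comp_def]
    have hnodup : (pvInner ps).keys.Nodup := by
      rw [hkeys]; exact PySem.List.nodup_dedup ..
    rw [List.map_append, List.map_cons, List.map_nil, pvDedup_append]
    by_cases h : q.1 ∈ ps.map (fun r => r.1)
    · have hget : (pvInner ps).get? q.1
          = some ((ps.filter (fun r => r.1 == q.1)).map (fun r => r.2)) := by
        refine PySem.Dict.get?_of_mem_items _ ?_ hnodup
        rw [ih]
        exact List.mem_map_of_mem ((PySem.List.mem_dedup ..).2 h)
      have hcont : (pvInner ps).contains q.1 = true := by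
        rw [PySem.Dict.contains_eq_isSome_get?, hget]; rfl
      rw [PySem.Dict.items_insert_of_contains _ _ hcont,
          PySem.Dict.getD_of_get?_eq_some _ [] hget, ih, if_pos h, List.map_map]
      apply List.map_congr_left
      intro l hl
      by_cases hlq : l = q.1
      · subst hlq
        simp [List.filter_append]
      · have hql : ¬ (q.1 = l) := fun h' => hlq h'.symm
        simp [List.filter_append, hlq, hql]
    · have hget : (pvInner ps).get? q.1 = none := by
        rw [PySem.Dict.get?_eq_none_iff_not_mem_keys, hkeys]
        exact fun hc => h ((PySem.List.mem_dedup ..).1 hc)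
      have hcont : (pvInner ps).contains q.1 = false := by
        rw [PySem.Dict.contains_eq_isSome_get?, hget]; rfl
      rw [PySem.Dict.items_insert_of_not_contains _ _ hcont,
          PySem.Dict.getD_of_get?_eq_none _ [] hget, ih, if_neg h, List.map_append]
      congr 1
      · apply List.map_congr_left
        intro l hl
        have hlq : ¬ (q.1 = l) := fun h' => h (h' ▸ ((PySem.List.mem_dedup ..).1 hl))
        simp [List.filter_append, hlq]
      · have hfil : ps.filter (fun r => r.1 == q.1) = [] := by
          rw [List.filter_eq_nil_iff]
          intro r hr hb
          have hr1 : r.1 = q.1 := by simpa using hb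
          exact h (hr1 ▸ List.mem_map_of_mem hr)
        simp [List.filter_append, hfil]

lemma pvSel_append (ts : List (String × String × String)) (x : String × String × String) (t : String) :
    pvSel (ts ++ [x]) t = pvSel ts t ++ (if x.1 == t then [x.2] else []) := by
  simp only [pvSel, List.filter_append, List.map_append]
  congr 1
  split <;> simp_all

lemma pvBuild_items (ts : List (String × String × String)) :
    (ts.foldl pvStep PySem.Dict.empty).items
      = (PySem.List.dedup (ts.map (fun x => x.1))).map (fun t => (t, pvInner (pvSel ts t))) := by
  induction ts using List.reverseRecOn with
  | nil => rfl
  | append_singleton ts x ih =>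
    rw [List.foldl_append, List.foldl_cons, List.foldl_nil]
    have hkeys : (ts.foldl pvStep PySem.Dict.empty).keys
        = PySem.List.dedup (ts.map (fun y => y.1)) := by
      simp only [PySem.Dict.keys, ih, List.map_map]
      simp [Function.comp_def]
    have hnodup : (ts.foldl pvStep PySem.Dict.empty).keys.Nodup := by
      rw [hkeys]; exact PySem.List.nodup_dedup ..
    rw [List.map_append, List.map_cons, List.map_nil, pvDedup_append]
    by_cases h : x.1 ∈ ts.map (fun y => y.1)
    · have hget : (ts.foldl pvStep PySem.Dict.empty).get? x.1 = some (pvInner (pvSel ts x.1)) := by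
        refine PySem.Dict.get?_of_mem_items _ ?_ hnodup
        rw [ih]
        exact List.mem_map_of_mem ((PySem.List.mem_dedup ..).2 h)
      have hsel : pvSel ts x.1 ≠ [] := by
        unfold pvSel
        intro hnil
        rw [List.map_eq_nil_iff, List.filter_eq_nil_iff] at hnil
        obtain ⟨y, hy, hy1⟩ := List.mem_map.1 h
        exact hnil y hy (by simp [hy1])
      have hne : ((pvInner (pvSel ts x.1)).items).isEmpty = false := by
        rw [pvInner_items, List.isEmpty_eq_false_iff, ne_eq, List.map_eq_nil_iff]
        exact pvDedup_ne_nil _ (by simpa [List.map_eq_nil_iff] using hsel)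
      have hstep : pvStep (ts.foldl pvStep PySem.Dict.empty) x
          = (ts.foldl pvStep PySem.Dict.empty).insert x.1
              (pvInner (pvSel ts x.1 ++ [(x.2.1, x.2.2)])) := by
        rw [pvInner_append]
        simp only [pvStep, hget, hne, Bool.false_eq_true, if_false]
        rw [PySem.Dict.getD_of_get?_eq_some _ _ hget]
      rw [hstep]
      have hcont : (ts.foldl pvStep PySem.Dict.empty).contains x.1 = true := by
        rw [PySem.Dict.contains_eq_isSome_get?, hget]; rfl
      rw [PySem.Dict.items_insert_of_contains _ _ hcont, ih, if_pos h, List.map_map]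
      apply List.map_congr_left
      intro t ht
      by_cases htx : t = x.1
      · subst htx
        simp [pvSel_append]
      · have hxt : ¬ (t = x.1) := htx
        simp only [Function.comp_def, beq_iff_eq, hxt, if_false, pvSel_append]
        have : ¬ (x.1 = t) := fun h' => htx h'.symm
        simp [this]
    · have hget : (ts.foldl pvStep PySem.Dict.empty).get? x.1 = none := by
        rw [PySem.Dict.get?_eq_none_iff_not_mem_keys _ _, hkeys]
        exact fun hc => h ((PySem.List.mem_dedup ..).1 hc)
      have hstep : pvStep (ts.foldl pvStep PySem.Dict.empty) x
          = (ts.foldl pvStep PySem.Dict.empty).insert x.1 (pvInner [(x.2.1, x.2.2)]) := by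
        simp only [pvStep, hget]
        rw [PySem.Dict.insert_insert_self]
        congr 1
        rw [PySem.Dict.getD_insert]
        simp [pvInner, PySem.Dict.getD_empty]
      rw [hstep]
      have hcont : (ts.foldl pvStep PySem.Dict.empty).contains x.1 = false := by
        rw [PySem.Dict.contains_eq_isSome_get?, hget]; rfl
      rw [PySem.Dict.items_insert_of_not_contains _ _ hcont, ih, if_neg h, List.map_append]
      congr 1
      · apply List.map_congr_left
        intro t ht
        have htx : ¬ (x.1 = t) :=
          fun h' => h (h' ▸ ((PySem.List.mem_dedup ..).1 ht))
        simp [pvSel_append, htx]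
      · have hfil : pvSel (ts ++ [x]) x.1 = [(x.2.1, x.2.2)] := by
          rw [pvSel_append]
          have hnil : pvSel ts x.1 = [] := by
            unfold pvSel
            rw [List.map_eq_nil_iff, List.filter_eq_nil_iff]
            intro r hr hb
            have hr1 : r.1 = x.1 := by simpa using hb
            exact h (hr1 ▸ List.mem_map_of_mem hr)
          simp [hnil]
        simp [hfil]

lemma pvA_eq (data : List (String × List (String × List (String × String)))) :
    sort_by_annotations data
      = ((pvFlat data).foldl pvStep PySem.Dict.empty).items.map (fun p => (p.1, p.2.items)) := by
  unfold sort_by_annotations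
  rw [pvFoldl_nested]

lemma pvAlt_eq (data : List (String × List (String × List (String × String)))) :
    sort_by_annotations_alt data
      = (PySem.List.dedup ((pvFlat data).map (fun x => x.1))).map (fun t =>
          (t, (PySem.List.dedup (((pvFlat data).filter (fun x => x.1 == t)).map (fun x => x.2.1))).map (fun l =>
            (l, ((pvFlat data).filter (fun x => x.1 == t && x.2.1 == l)).map (fun x => x.2.2))))) := rfl

-- ===== VERDICT (by name: the statement is the Claim_ definition above) =====
theorem sort_by_annotations_spec : Claim_equal_sort_by_annotations := by
  intro data _hdom _hpre
  unfold Spec_sort_by_annotations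
  rw [pvA_eq, pvAlt_eq, pvBuild_items, List.map_map]
  apply List.map_congr_left
  intro t ht
  simp only [Function.comp_def]
  rw [pvInner_items,
    show pvSel (pvFlat data) t
        = ((pvFlat data).filter (fun x => x.1 == t)).map (fun x => x.2) from rfl,
    List.map_map]
  simp only [Function.comp_def]
  congr 1
  apply List.map_congr_left
  intro l _
  rw [List.filter_map, List.map_map]
  congr 1
  rw [List.filter_filter]
  simp only [Function.comp_def]
  exact congrArg _ (List.filter_congr (fun (a : String × String × String) _ => Bool.and_comm (a.2.1 == l) (a.1 == t)))
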